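-- pv_equiv track=rewrite | github.com/BillBrieferServer/ces-api | routers/vendor_import.py | _guess_mapping
-- ===== SOURCE A (Python) =====
-- GUESS_PATTERNS = {
--     "vendor_name": ["vendor", "company", "business", "organization", "org name", "firm"],
--     "contact_name": ["contact", "full name", "person", "name"],
--     "contact_title": ["title", "position", "role", "job title"],
--     "phone": ["work phone", "office phone", "phone", "telephone", "tel"],
--     "cell_phone": ["cell", "mobile"],
--     "email": ["email", "e-mail", "mail"],
--     "website": ["website", "web", "url", "site"],
--     "address": ["address", "street", "location"],
--     "source": ["source"],
--     "bluebook_status": ["bluebook"],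
--     "ces_contract_category": ["category", "contract"],
-- }
--
-- def _guess_mapping(headers):
--     mapping = {}
--     used = set()
--     for field, pats in GUESS_PATTERNS.items():
--         best = None
--         for h in headers:
--             if h in used or not h:
--                 continue
--             hl = h.lower().strip()
--             for p in pats:
--                 if p == hl:
--                     best = h
--                     break
--             if best:
--                 break
--         if not best:
--             for h in headers:
--                 if h in used or not h:
--                     continue
--                 hl = h.lower().strip()
--                 if any(p in hl for p in pats):
--                     best = h
--                     break
--         if best:
--             mapping[field] = best
--             used.add(best)
--     return mapping
-- ===== SOURCE B (Python) =====
-- GUESS_PATTERNS = {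
--     "vendor_name": ["vendor", "company", "business", "organization", "org name", "firm"],
--     "contact_name": ["contact", "full name", "person", "name"],
--     "contact_title": ["title", "position", "role", "job title"],
--     "phone": ["work phone", "office phone", "phone", "telephone", "tel"],
--     "cell_phone": ["cell", "mobile"],
--     "email": ["email", "e-mail", "mail"],
--     "website": ["website", "web", "url", "site"],
--     "address": ["address", "street", "location"],
--     "source": ["source"],
--     "bluebook_status": ["bluebook"],
--     "ces_contract_category": ["category", "contract"],
-- }
--
-- def _guess_mapping(headers):
--     mapping = {}
--     used = set()
--     for field, pats in GUESS_PATTERNS.items():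
--         best = None
--         substr = None
--         for h in headers:
--             if h in used or not h:
--                 continue
--             hl = h.lower().strip()
--             if hl in pats:
--                 best = h
--                 break
--             if substr is None and any(p in hl for p in pats):
--                 substr = h
--         if best is None:
--             best = substr
--         if best is not None:
--             mapping[field] = best
--             used.add(best)
--     return mapping
-- ===== Notes on version B (the rewrite author's own statement) =====
-- stated objective: simpler
-- what changed: Per field, A makes two passes over the headers (exact-match pass, then substring pass, with a hand-written inner break loop over patterns); B makes a single pass keeping two candidates (first exact, first substring) and breaking on the first exact match.
import Mathlib
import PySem

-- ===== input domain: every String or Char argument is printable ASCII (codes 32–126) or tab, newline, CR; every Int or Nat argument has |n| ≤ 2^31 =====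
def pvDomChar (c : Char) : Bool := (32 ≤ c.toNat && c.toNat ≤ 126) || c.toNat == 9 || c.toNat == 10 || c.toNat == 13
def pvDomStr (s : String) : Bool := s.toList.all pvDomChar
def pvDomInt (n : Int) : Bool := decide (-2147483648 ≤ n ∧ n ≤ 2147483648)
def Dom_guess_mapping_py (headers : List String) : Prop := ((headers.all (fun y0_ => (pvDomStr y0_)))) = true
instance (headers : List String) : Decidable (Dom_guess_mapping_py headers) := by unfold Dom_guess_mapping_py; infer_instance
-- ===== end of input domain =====

-- ===== PORT A =====
-- B replaces A's two header passes per field by a single pass with two candidates; return value only.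

-- the module constant GUESS_PATTERNS (insertion order of the Python dict)
def guessPatterns : List (String × List String) :=
  [("vendor_name", ["vendor", "company", "business", "organization", "org name", "firm"]),
   ("contact_name", ["contact", "full name", "person", "name"]),
   ("contact_title", ["title", "position", "role", "job title"]),
   ("phone", ["work phone", "office phone", "phone", "telephone", "tel"]),
   ("cell_phone", ["cell", "mobile"]),
   ("email", ["email", "e-mail", "mail"]),
   ("website", ["website", "web", "url", "site"]),
   ("address", ["address", "street", "location"]),
   ("source", ["source"]),
   ("bluebook_status", ["bluebook"]),
   ("ces_contract_category", ["category", "contract"])]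

-- inner 'for p in pats: if p == hl: best = h; break'
def exactInner (pats : List String) (hl h : String) : Option String :=
  match pats with
  | [] => none
  | p :: rest => if p == hl then some h else exactInner rest hl h

-- first header loop of A (breaks as soon as best is set)
def loopExact (used : PySem.Set String) (pats : List String) (headers : List String) : Option String :=
  match headers with
  | [] => none
  | h :: rest =>
    if used.contains h || h == "" then loopExact used pats rest
    else
      match exactInner pats (PySem.Str.strip (PySem.Str.lower h)) h with
      | some b => some b
      | none => loopExact used pats rest

-- second header loop of A ('if any(p in hl for p in pats)')
def loopSub (used : PySem.Set String) (pats : List String) (headers : List String) : Option String :=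
  match headers with
  | [] => none
  | h :: rest =>
    if used.contains h || h == "" then loopSub used pats rest
    else
      if pats.any (fun p => PySem.Str.isIn p (PySem.Str.strip (PySem.Str.lower h))) then some h
      else loopSub used pats rest

-- the field loop of A
def goA (headers : List String) : List (String × List String) → PySem.Dict String String → PySem.Set String → PySem.Dict String String
  | [], m, _ => m
  | (field, pats) :: rest, m, used =>
    let best :=
      match loopExact used pats headers with
      | some b => some b
      | none => loopSub used pats headers
    match best with
    | some b => goA headers rest (m.insert field b) (used.add b)
    | none => goA headers rest m used

def guess_mapping_py (headers : List String) : List (String × String) :=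
  (goA headers guessPatterns PySem.Dict.empty PySem.Set.empty).items

-- ===== PORT B =====
-- single header pass of B: break on first exact match, remember first substring match in `sub`
def bestB (used : PySem.Set String) (pats : List String) (headers : List String) (sub : Option String) : Option String :=
  match headers with
  | [] => sub
  | h :: rest =>
    if used.contains h || h == "" then bestB used pats rest sub
    else
      let hl := PySem.Str.strip (PySem.Str.lower h)
      if pats.any (fun p => p == hl) then some h
      else if sub.isNone && pats.any (fun p => PySem.Str.isIn p hl) then bestB used pats rest (some h)
      else bestB used pats rest sub

-- the field loop of B
def goB (headers : List String) : List (String × List String) → PySem.Dict String String → PySem.Set String → PySem.Dict String String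
  | [], m, _ => m
  | (field, pats) :: rest, m, used =>
    match bestB used pats headers none with
    | some b => goB headers rest (m.insert field b) (used.add b)
    | none => goB headers rest m used

def guess_mapping_py_alt (headers : List String) : List (String × String) :=
  (goB headers guessPatterns PySem.Dict.empty PySem.Set.empty).items

-- ===== PRECONDITION & SPEC =====
def Spec_guess_mapping_py (headers : List String) (out : List (String × String)) : Prop := out = guess_mapping_py_alt headers
instance (headers : List String) (out : List (String × String)) : Decidable (Spec_guess_mapping_py headers out) := by unfold Spec_guess_mapping_py; infer_instance

-- ===== CLAIM (what is proved, stated in full; the proofs are below) =====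
def Claim_equal_guess_mapping_py : Prop := ∀ (headers : List String), Dom_guess_mapping_py headers → Spec_guess_mapping_py headers (guess_mapping_py headers)

-- ===== LEMMAS AND PROOFS =====

-- A's hand-written break loop over pats finds h iff some pattern equals hl
lemma exactInner_eq (pats : List String) (hl h : String) :
    exactInner pats hl h = if pats.any (fun p => p == hl) then some h else none := by
  induction pats with
  | nil => rfl
  | cons p rest ih => simp only [exactInner, List.any_cons, ih]; by_cases hp : p == hl <;> simp [hp]

-- B's single pass with accumulator equals A's two passes
lemma bestB_eq (used : PySem.Set String) (pats : List String) (headers : List String) (sub : Option String) :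
    bestB used pats headers sub =
      match loopExact used pats headers with
      | some b => some b
      | none => match sub with
                | some s => some s
                | none => loopSub used pats headers := by
  induction headers generalizing sub with
  | nil => cases sub <;> rfl
  | cons h rest ih =>
    simp only [bestB, loopExact, loopSub, exactInner_eq]
    by_cases hskip : (used.contains h || h == "") = true
    · simp only [hskip, if_true]; exact ih sub
    · simp only [hskip, Bool.false_eq_true, if_false]
      by_cases hex : pats.any (fun p => p == PySem.Str.strip (PySem.Str.lower h)) = true
      · simp only [hex, if_true]
      · simp only [hex, Bool.false_eq_true, if_false]
        by_cases hsub : pats.any (fun p => PySem.Str.isIn p (PySem.Str.strip (PySem.Str.lower h))) = true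
        · cases sub with
          | none =>
            simp only [hsub, if_true, Option.isNone_none, Bool.true_and]
            exact ih (some h)
          | some s =>
            simp only [hsub, Option.isNone_some, Bool.false_and, Bool.false_eq_true, if_false]
            exact ih (some s)
        · cases sub with
          | none =>
            simp only [hsub, Option.isNone_none, Bool.true_and, Bool.false_eq_true, if_false]
            exact ih none
          | some s =>
            simp only [hsub, Option.isNone_some, Bool.false_and, Bool.false_eq_true, if_false]
            exact ih (some s)

lemma goA_eq_goB (headers : List String) (fields : List (String × List String))
    (m : PySem.Dict String String) (used : PySem.Set String) :
    goA headers fields m used = goB headers fields m used := by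
  induction fields generalizing m used with
  | nil => rfl
  | cons fp rest ih =>
    obtain ⟨field, pats⟩ := fp
    simp only [goA, goB, bestB_eq]
    cases hx : loopExact used pats headers with
    | some b => simp [ih]
    | none =>
      cases hs : loopSub used pats headers with
      | some b => simp [ih]
      | none => simp [ih]

-- ===== VERDICT (by name: the statement is the Claim_ definition above) =====
theorem guess_mapping_py_spec : Claim_equal_guess_mapping_py := by
  intro headers _
  unfold Spec_guess_mapping_py guess_mapping_py guess_mapping_py_alt
  rw [goA_eq_goB]
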